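-- pv_equiv track=rewrite | github.com/pypi-data/pypi-mirror-204 | packages/hakurei-sqlalchemy-graphqlapi/hakurei_sqlalchemy_graphqlapi-0.0.1.dev24-py3-none-any.whl/graphqldb/adapter.py | get_gql_fields
-- ===== SOURCE A (Python) =====
-- from collections import defaultdict
-- from typing import (
--     Any,
--     Collection,
--     Dict,
--     Iterator,
--     List,
--     Optional,
--     Sequence,
--     Tuple,
--     Union,
--     cast,
-- )
--
-- def get_gql_fields(column_names: Sequence[str]) -> str:
--     # TODO(cancan101): actually nest this
--     def get_field_str(fields: List[str], root: Optional[str] = None) -> str: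
--         ret = " ".join(fields)
--         if root is not None:
--             ret = f"{root} {{{ret}}}"
--         return ret
--
--     mappings: Dict[Optional[str], List[str]] = defaultdict(list)
--     for field in [x.split("__", 1) for x in column_names]:
--         if len(field) == 1:
--             mappings[None].append(field[-1])
--         else:
--             mappings[field[0]].append(field[-1])
--
--     fields_str = " ".join(
--         get_field_str(fields, root=root) for root, fields in mappings.items()
--     )
--     return fields_str
-- ===== SOURCE B (Python) =====
-- def get_gql_fields(column_names):
--     def parse(name):
--         parts = name.split("__", 1)
--         if len(parts) == 2:
--             return parts[0], parts[1]
--         return None, parts[0]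
--
--     roots = list(dict.fromkeys(parse(name)[0] for name in column_names))
--     groups = []
--     for root in roots:
--         parts = []
--         for name in column_names:
--             r, suffix = parse(name)
--             if r == root:
--                 parts.append(suffix)
--         joined = " ".join(parts)
--         groups.append(joined if root is None else root + " {" + joined + "}")
--     return " ".join(groups)
-- ===== Notes on version B (the rewrite author's own statement) =====
-- stated objective: alternative
-- what changed: Replaces the single-pass defaultdict grouping with an enumerate-distinct-roots-then-rescan scheme: one pass collects the ordered distinct roots, then each root makes its own pass over column_names collecting suffixes.
import Mathlib
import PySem

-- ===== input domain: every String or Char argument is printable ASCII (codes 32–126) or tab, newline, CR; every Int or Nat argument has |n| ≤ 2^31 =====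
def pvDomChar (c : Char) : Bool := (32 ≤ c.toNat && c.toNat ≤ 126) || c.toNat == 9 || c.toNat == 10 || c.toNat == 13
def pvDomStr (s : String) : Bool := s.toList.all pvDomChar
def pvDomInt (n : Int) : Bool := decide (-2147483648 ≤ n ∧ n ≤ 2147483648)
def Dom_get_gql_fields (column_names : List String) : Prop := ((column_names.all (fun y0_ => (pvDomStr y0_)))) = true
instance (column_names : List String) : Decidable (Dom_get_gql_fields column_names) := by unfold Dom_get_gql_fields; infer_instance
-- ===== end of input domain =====

-- B replaces A's one-pass defaultdict grouping by listing the distinct roots and re-scanning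
-- column_names once per root (objective: alternative decomposition, same results).

-- ===== PORT A =====
-- get_field_str helper of A (strings handled as List Char; f"{root} {{{ret}}}" = root ++ " {" ++ ret ++ "}")
def pvGetFieldStr (fields : List (List Char)) (root : Option (List Char)) : List Char :=
  let ret := PySem.Chars.join [' '] fields
  match root with
  | none => ret
  | some r => r ++ [' ', '{'] ++ ret ++ ['}']

def get_gql_fields (column_names : List String) : String :=
  let mappings : PySem.Dict (Option (List Char)) (List (List Char)) :=
    (column_names.map (fun x => PySem.Chars.splitOnMax x.toList ['_', '_'] 1)).foldl
      (fun d field =>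
        if field.length = 1 then
          d.modify none [] (fun fs => fs ++ [field.getLastD []])
        else
          d.modify (some (field.headD [])) [] (fun fs => fs ++ [field.getLastD []]))
      PySem.Dict.empty
  String.ofList (PySem.Chars.join [' '] (mappings.items.map (fun p => pvGetFieldStr p.2 p.1)))

-- ===== PORT B =====
-- parse helper of B: name.split("__", 1) → (root?, suffix)
def pvParse (name : List Char) : Option (List Char) × List Char :=
  let parts := PySem.Chars.splitOnMax name ['_', '_'] 1
  if parts.length = 2 then (some (parts.headD []), parts.getLastD [])
  else (none, parts.headD [])

def get_gql_fields_alt (column_names : List String) : String :=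
  let roots := PySem.List.dedup (column_names.map (fun name => (pvParse name.toList).1))
  let groups := roots.foldl (fun gs root =>
    let parts := column_names.foldl (fun acc name =>
      if (pvParse name.toList).1 == root then acc ++ [(pvParse name.toList).2] else acc) []
    let joined := PySem.Chars.join [' '] parts
    gs ++ [match root with
           | none => joined
           | some r => r ++ [' ', '{'] ++ joined ++ ['}']]) []
  String.ofList (PySem.Chars.join [' '] groups)

-- ===== PRECONDITION & SPEC =====
def Spec_get_gql_fields (column_names : List String) (out : String) : Prop := out = get_gql_fields_alt column_names
instance (column_names : List String) (out : String) : Decidable (Spec_get_gql_fields column_names out) := by unfold Spec_get_gql_fields; infer_instance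

-- ===== CLAIM (what is proved, stated in full; the proofs are below) =====
def Claim_equal_get_gql_fields : Prop := ∀ (column_names : List String), Dom_get_gql_fields column_names → Spec_get_gql_fields column_names (get_gql_fields column_names)

-- ===== LEMMAS AND PROOFS =====

-- A's key and value of one split field
def pvKf (field : List (List Char)) : Option (List Char) :=
  if field.length = 1 then none else some (field.headD [])
def pvVf (field : List (List Char)) : List Char := field.getLastD []

def pvSplitL (x : String) : List (List Char) := PySem.Chars.splitOnMax x.toList ['_', '_'] 1

theorem pv_go_len (sep : List Char) : ∀ (fuel m : Nat) (l cur : List Char) (acc : List (List Char)),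
    acc.length + 1 ≤ (PySem.Chars.splitOnMax.go sep fuel m l cur acc).length ∧
    (PySem.Chars.splitOnMax.go sep fuel m l cur acc).length ≤ acc.length + m + 1 := by
  intro fuel
  induction fuel with
  | zero => intro m l cur acc; simp [PySem.Chars.splitOnMax.go]
  | succ fuel ih =>
    intro m l cur acc
    cases l with
    | nil => simp [PySem.Chars.splitOnMax.go]
    | cons c rest =>
      rw [PySem.Chars.splitOnMax.go]
      split_ifs with hm hp
      · simp
      · have := ih (m - 1) (List.drop sep.length (c :: rest)) [] (cur.reverse :: acc)
        simp at this ⊢; omega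
      · have := ih m rest (c :: cur) acc
        omega

theorem pv_split_len (x : String) : (pvSplitL x).length = 1 ∨ (pvSplitL x).length = 2 := by
  have h := pv_go_len ['_', '_'] (x.toList.length + 1) 1 x.toList [] []
  simp only [pvSplitL, PySem.Chars.splitOnMax]
  norm_num
  simp at h
  omega

theorem pv_parse_eq (x : String) : pvParse x.toList = (pvKf (pvSplitL x), pvVf (pvSplitL x)) := by
  have hdef : PySem.Chars.splitOnMax x.toList ['_', '_'] 1 = pvSplitL x := rfl
  rcases pv_split_len x with h | h
  · obtain ⟨a, ha⟩ := List.length_eq_one_iff.mp h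
    simp [pvParse, pvKf, pvVf, hdef, ha]
  · simp [pvParse, pvKf, pvVf, hdef, h]

-- A computed in root-list form
theorem pv_A_eq (cns : List String) :
    get_gql_fields cns = String.ofList (PySem.Chars.join [' ']
      ((PySem.Set.ofList (cns.map (fun n => pvKf (pvSplitL n)))).map
        (fun r => pvGetFieldStr ((cns.filter (fun n => pvKf (pvSplitL n) == r)).map
          (fun n => pvVf (pvSplitL n))) r))) := by
  have hfold : (fun x : String => PySem.Chars.splitOnMax x.toList ['_', '_'] 1) = pvSplitL := rfl
  have hbody : (fun (d : PySem.Dict (Option (List Char)) (List (List Char))) (field : List (List Char)) =>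
      if field.length = 1 then
        d.modify none [] (fun fs => fs ++ [field.getLastD []])
      else
        d.modify (some (field.headD [])) [] (fun fs => fs ++ [field.getLastD []]))
      = (fun d field => d.modify (pvKf field) [] (fun fs => fs ++ [pvVf field])) := by
    funext d field
    by_cases h : field.length = 1 <;> simp [pvKf, pvVf, h]
  simp only [get_gql_fields, hfold, hbody]
  set fields := cns.map pvSplitL with hfields
  set d := fields.foldl (fun d field => d.modify (pvKf field) [] (fun fs => fs ++ [pvVf field]))
      PySem.Dict.empty with hd
  have hnodup : d.keys.Nodup := by
    apply PySem.Dict.nodup_keys_foldl_modify_key fields pvKf [] (fun _ field fs => fs ++ [pvVf field])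
    exact List.nodup_nil
  have hkeys : d.keys = PySem.Set.ofList (cns.map (fun n => pvKf (pvSplitL n))) := by
    rw [hd, PySem.Dict.keys_foldl_modify_key fields pvKf [] (fun _ field fs => fs ++ [pvVf field])]
    rw [hfields, List.map_map]
    rfl
  have hget : ∀ c, d.getD c [] = (cns.filter (fun n => pvKf (pvSplitL n) == c)).map
      (fun n => pvVf (pvSplitL n)) := by
    intro c
    have hmap : d = (fields.map (fun f => (pvKf f, pvVf f))).foldl
        (fun d p => d.modify p.1 [] (fun fs => fs ++ [p.2])) PySem.Dict.empty := by
      rw [List.foldl_map]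
    rw [hmap, PySem.Dict.getD_foldl_modify_append]
    simp only [hfields, List.filter_map, List.map_map]
    rfl
  rw [PySem.Dict.items_eq_map_keys d hnodup [], List.map_map, hkeys]
  congr 2
  apply List.map_congr_left
  intro r _
  simp [Function.comp, hget r]

-- B computed in the same form
theorem pv_B_eq (cns : List String) :
    get_gql_fields_alt cns = String.ofList (PySem.Chars.join [' ']
      ((PySem.Set.ofList (cns.map (fun n => pvKf (pvSplitL n)))).map
        (fun r => pvGetFieldStr ((cns.filter (fun n => pvKf (pvSplitL n) == r)).map
          (fun n => pvVf (pvSplitL n))) r))) := by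
  simp only [get_gql_fields_alt, pv_parse_eq, PySem.List.dedup,
    PySem.List.foldl_append_if, PySem.List.foldl_append_singleton_eq_map, List.nil_append]
  rfl

-- ===== VERDICT (by name: the statement is the Claim_ definition above) =====
theorem get_gql_fields_spec : Claim_equal_get_gql_fields := by
  intro cns _
  unfold Spec_get_gql_fields
  rw [pv_A_eq, pv_B_eq]
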